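-- pv_equiv track=rewrite | github.com/CiciDu/multiff_analysis | multiff_code/methods/neural_data_analysis/neural_analysis_tools/encoding_tools/encoding_helpers/encode_stops_gam_helper.py | _expand_aliases_to_group_names
-- ===== SOURCE A (Python) =====
-- from typing import Any, Dict, List, Optional, Sequence, Tuple
--
-- def _expand_aliases_to_group_names(
--     aliases: Sequence[str],
--     available_group_names: Sequence[str],
-- ) -> List[str]:
--     available = set(available_group_names)
--     selected = set()
--     for alias in aliases:
--         if alias in available:
--             selected.add(alias)
--         boxcar_name = f"{alias}_boxcar"
--         if boxcar_name in available:
--             selected.add(boxcar_name)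
--         if alias == "spike_hist" and "spike_hist" in available:
--             selected.add("spike_hist")
--         if alias == "coupling":
--             selected.update([g for g in available if g.startswith("cpl_")])
--     return sorted(selected)
-- ===== SOURCE B (Python) =====
-- def _expand_aliases_to_group_names(aliases, available_group_names):
--     alias_set = set(aliases)
--     boxcar_set = {a + "_boxcar" for a in aliases}
--     has_coupling = "coupling" in alias_set
--     matched = {
--         g
--         for g in available_group_names
--         if g in alias_set
--         or g in boxcar_set
--         or (has_coupling and g.startswith("cpl_"))
--     }
--     return sorted(matched)
-- ===== Notes on version B (the rewrite author's own statement) =====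
-- stated objective: alternative
-- what changed: Inverted the iteration: instead of looping over aliases and probing the available set per alias, B precomputes set(aliases) and the derived boxcar-name set once and classifies each available group name in a single pass (the redundant spike_hist special case disappears).
import Mathlib
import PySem

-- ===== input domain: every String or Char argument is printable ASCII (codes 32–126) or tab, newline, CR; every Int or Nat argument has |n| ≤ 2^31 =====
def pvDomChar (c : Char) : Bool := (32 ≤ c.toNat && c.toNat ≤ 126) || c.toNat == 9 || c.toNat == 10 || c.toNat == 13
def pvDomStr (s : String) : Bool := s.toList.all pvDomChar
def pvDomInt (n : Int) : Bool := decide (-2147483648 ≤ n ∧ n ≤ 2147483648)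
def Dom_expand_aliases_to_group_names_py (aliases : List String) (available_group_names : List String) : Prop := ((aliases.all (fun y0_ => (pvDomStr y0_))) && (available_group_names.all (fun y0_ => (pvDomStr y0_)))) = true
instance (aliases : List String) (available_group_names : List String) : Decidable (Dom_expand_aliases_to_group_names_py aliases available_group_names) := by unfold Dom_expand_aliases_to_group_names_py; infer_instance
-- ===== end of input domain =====

-- B runs a single classifying pass over available_group_names with precomputed alias/boxcar sets
-- instead of A's per-alias probing (with a per-alias rescan of available in the coupling branch).

-- ===== PORT A =====
-- one loop step of A's 'for alias in aliases' body
def pvStepA (available : PySem.Set String) (selected : PySem.Set String) (alias_ : String) : PySem.Set String :=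
  let selected := if PySem.Set.contains available alias_ then PySem.Set.add selected alias_ else selected
  let boxcar_name := alias_ ++ "_boxcar"
  let selected := if PySem.Set.contains available boxcar_name then PySem.Set.add selected boxcar_name else selected
  let selected := if alias_ == "spike_hist" && PySem.Set.contains available "spike_hist" then PySem.Set.add selected "spike_hist" else selected
  if alias_ == "coupling" then PySem.Set.update selected (available.filter (fun g => PySem.Str.startswith g "cpl_")) else selected

def expand_aliases_to_group_names_py (aliases : List String) (available_group_names : List String) : List String :=
  let available := PySem.Set.ofList available_group_names
  let selected := aliases.foldl (pvStepA available) PySem.Set.empty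
  PySem.List.sorted selected (fun x => x) false

-- ===== PORT B =====
def expand_aliases_to_group_names_py_alt (aliases : List String) (available_group_names : List String) : List String :=
  let alias_set := PySem.Set.ofList aliases
  let boxcar_set := PySem.Set.ofList (aliases.map (fun a => a ++ "_boxcar"))
  let has_coupling := PySem.Set.contains alias_set "coupling"
  let matched := PySem.Set.ofList (available_group_names.filter (fun g =>
    PySem.Set.contains alias_set g || PySem.Set.contains boxcar_set g ||
      (has_coupling && PySem.Str.startswith g "cpl_")))
  PySem.List.sorted matched (fun x => x) false

-- ===== PRECONDITION & SPEC =====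
def Spec_expand_aliases_to_group_names_py (aliases : List String) (available_group_names : List String) (out : List String) : Prop := out = expand_aliases_to_group_names_py_alt aliases available_group_names
instance (aliases : List String) (available_group_names : List String) (out : List String) : Decidable (Spec_expand_aliases_to_group_names_py aliases available_group_names out) := by unfold Spec_expand_aliases_to_group_names_py; infer_instance

-- ===== CLAIM (what is proved, stated in full; the proofs are below) =====
def Claim_equal_expand_aliases_to_group_names_py : Prop := ∀ (aliases : List String) (available_group_names : List String), Dom_expand_aliases_to_group_names_py aliases available_group_names → Spec_expand_aliases_to_group_names_py aliases available_group_names (expand_aliases_to_group_names_py aliases available_group_names)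

-- ===== LEMMAS AND PROOFS =====

-- membership condition contributed by one alias in A's loop
def pvHit (avail : List String) (a y : String) : Prop :=
  (a ∈ avail ∧ y = a) ∨ (a ++ "_boxcar" ∈ avail ∧ y = a ++ "_boxcar") ∨
    (a = "coupling" ∧ y ∈ avail ∧ PySem.Str.startswith y "cpl_" = true)

theorem pvStepA_nodup (avail : List String) (s : PySem.Set String) (a : String)
    (h : s.Nodup) : (pvStepA (PySem.Set.ofList avail) s a).Nodup := by
  simp only [pvStepA]
  split_ifs <;>
    (repeat' first
      | exact h
      | apply PySem.Set.nodup_update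
      | apply PySem.Set.nodup_add)

theorem pvStepA_mem (avail : List String) (s : PySem.Set String) (a y : String) :
    y ∈ pvStepA (PySem.Set.ofList avail) s a ↔ y ∈ s ∨ pvHit avail a y := by
  simp only [pvStepA, pvHit]
  split_ifs <;>
    simp_all [PySem.Set.mem_add, PySem.Set.mem_update, PySem.Set.mem_ofList, List.mem_filter, beq_iff_eq] <;>
    tauto

theorem pvFoldA_nodup (avail : List String) (aliases : List String) (s : PySem.Set String)
    (h : s.Nodup) : (aliases.foldl (pvStepA (PySem.Set.ofList avail)) s).Nodup := by
  induction aliases generalizing s with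
  | nil => exact h
  | cons a t ih => exact ih _ (pvStepA_nodup avail s a h)

theorem pvFoldA_mem (avail : List String) (aliases : List String) (s : PySem.Set String) (y : String) :
    y ∈ aliases.foldl (pvStepA (PySem.Set.ofList avail)) s ↔ y ∈ s ∨ ∃ a ∈ aliases, pvHit avail a y := by
  induction aliases generalizing s with
  | nil => simp
  | cons a t ih =>
    simp only [List.foldl_cons, ih, pvStepA_mem, List.mem_cons]
    constructor
    · rintro ((h | h) | ⟨b, hb, h⟩)
      · exact Or.inl h
      · exact Or.inr ⟨a, Or.inl rfl, h⟩
      · exact Or.inr ⟨b, Or.inr hb, h⟩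
    · rintro (h | ⟨b, (rfl | hb), h⟩)
      · exact Or.inl (Or.inl h)
      · exact Or.inl (Or.inr h)
      · exact Or.inr ⟨b, hb, h⟩

-- B's matched-set membership equals the union over aliases of A's per-alias hits
theorem pv_mem_iff (aliases avail : List String) (y : String) :
    (y ∈ avail ∧ (y ∈ aliases ∨ (∃ a ∈ aliases, y = a ++ "_boxcar") ∨
        ("coupling" ∈ aliases ∧ PySem.Str.startswith y "cpl_" = true)))
      ↔ ∃ a ∈ aliases, pvHit avail a y := by
  unfold pvHit
  constructor
  · rintro ⟨hy, (h | ⟨a, ha, rfl⟩ | ⟨hc, hs⟩)⟩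
    · exact ⟨y, h, Or.inl ⟨hy, rfl⟩⟩
    · exact ⟨a, ha, Or.inr (Or.inl ⟨hy, rfl⟩)⟩
    · exact ⟨"coupling", hc, Or.inr (Or.inr ⟨rfl, hy, hs⟩)⟩
  · rintro ⟨a, ha, (⟨h, rfl⟩ | ⟨h, rfl⟩ | ⟨rfl, hy, hs⟩)⟩
    · exact ⟨h, Or.inl ha⟩
    · exact ⟨h, Or.inr (Or.inl ⟨a, ha, rfl⟩)⟩
    · exact ⟨hy, Or.inr (Or.inr ⟨ha, hs⟩)⟩

-- ===== VERDICT (by name: the statement is the Claim_ definition above) =====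
theorem expand_aliases_to_group_names_py_spec : Claim_equal_expand_aliases_to_group_names_py := by
  intro aliases avail _
  unfold Spec_expand_aliases_to_group_names_py
  unfold expand_aliases_to_group_names_py expand_aliases_to_group_names_py_alt
  apply PySem.List.sorted_eq_sorted_of_perm _ _ _ (fun _ _ h => h)
  rw [show (PySem.Set.empty : PySem.Set String) = [] from rfl]
  rw [List.perm_ext_iff_of_nodup (pvFoldA_nodup avail aliases _ List.nodup_nil)
    (PySem.Set.nodup_ofList _)]
  intro y
  rw [pvFoldA_mem]
  simp only [List.not_mem_nil, false_or, PySem.Set.mem_ofList, List.mem_filter,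
    Bool.or_eq_true, Bool.and_eq_true, PySem.Set.contains_iff, PySem.Set.mem_ofList,
    List.mem_map]
  rw [← pv_mem_iff aliases avail y]
  constructor
  · rintro ⟨hy, h⟩
    refine ⟨hy, ?_⟩
    rcases h with h | h | ⟨hc, hs⟩
    · exact Or.inl (Or.inl h)
    · rcases h with ⟨a, ha, hya⟩
      exact Or.inl (Or.inr ⟨a, ha, hya.symm⟩)
    · exact Or.inr ⟨hc, hs⟩
  · rintro ⟨hy, h⟩
    refine ⟨hy, ?_⟩
    rcases h with (h | ⟨a, ha, hya⟩) | ⟨hc, hs⟩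
    · exact Or.inl h
    · exact Or.inr (Or.inl ⟨a, ha, hya.symm⟩)
    · exact Or.inr (Or.inr ⟨hc, hs⟩)
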